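-- pv_equiv track=rewrite | github.com/VTDevilDragon1002/Elevate-project1 | pass checker/app.py | detect_sequence
-- ===== SOURCE A (Python) =====
-- def detect_sequence(password):
--
--     sequences = [
--         "1234567890",
--         "abcdefghijklmnopqrstuvwxyz",
--         "qwertyuiop",
--         "asdfghjkl",
--         "zxcvbnm"
--     ]
--
--     password = password.lower()
--
--     for seq in sequences:
--         for i in range(len(seq) - 3):
--             if seq[i:i+4] in password:
--                 return True
--
--     return False
-- ===== SOURCE B (Python) =====
-- def detect_sequence(password):
--     sequences = [
--         "1234567890",
--         "abcdefghijklmnopqrstuvwxyz",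
--         "qwertyuiop",
--         "asdfghjkl",
--         "zxcvbnm"
--     ]
--     grams = {seq[i:i+4] for seq in sequences for i in range(len(seq) - 3)}
--     p = password.lower()
--     return any(p[i:i+4] in grams for i in range(len(p) - 3))
-- ===== Notes on version B (the rewrite author's own statement) =====
-- stated objective: idiomatic
-- what changed: Instead of scanning the password once per 4-char chunk of each sequence (repeated substring searches), B precomputes the set of all 4-grams of the fixed sequences and slides a single length-4 window over the lowered password, testing set membership.
import Mathlib
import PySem

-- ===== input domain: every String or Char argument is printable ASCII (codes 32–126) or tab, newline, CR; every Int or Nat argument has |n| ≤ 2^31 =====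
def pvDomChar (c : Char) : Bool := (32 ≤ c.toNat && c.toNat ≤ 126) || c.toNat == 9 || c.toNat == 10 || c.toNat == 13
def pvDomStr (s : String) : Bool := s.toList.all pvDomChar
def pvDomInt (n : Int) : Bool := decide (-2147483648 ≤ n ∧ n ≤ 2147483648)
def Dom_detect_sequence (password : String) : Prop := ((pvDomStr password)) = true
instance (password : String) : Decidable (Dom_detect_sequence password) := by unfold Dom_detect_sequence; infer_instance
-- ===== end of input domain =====

-- B precomputes the set of all 4-grams of the fixed sequences and slides one length-4
-- window over the lowered password (set membership) instead of one substring search per gram (idiomatic).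


-- ===== PORT A =====
def pvSequences : List String :=
  ["1234567890", "abcdefghijklmnopqrstuvwxyz", "qwertyuiop", "asdfghjkl", "zxcvbnm"]

def detect_sequence (password : String) : Bool :=
  let p := PySem.Str.lower password
  pvSequences.any (fun seq =>
    (PySem.List.pyRange 0 (PySem.Str.len seq - 3) 1).any (fun i =>
      PySem.Str.isIn (PySem.Str.slice seq (some i) (some (i + 4))) p))

-- ===== PORT B =====
def detect_sequence_alt (password : String) : Bool :=
  let grams : PySem.Set String := PySem.Set.ofList
    (pvSequences.flatMap (fun seq =>
      (PySem.List.pyRange 0 (PySem.Str.len seq - 3) 1).map (fun i =>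
        PySem.Str.slice seq (some i) (some (i + 4)))))
  let p := PySem.Str.lower password
  (PySem.List.pyRange 0 (PySem.Str.len p - 3) 1).any (fun i =>
    PySem.Set.contains grams (PySem.Str.slice p (some i) (some (i + 4))))

-- ===== PRECONDITION & SPEC =====
def Spec_detect_sequence (password : String) (out : Bool) : Prop := out = detect_sequence_alt password
instance (password : String) (out : Bool) : Decidable (Spec_detect_sequence password out) := by unfold Spec_detect_sequence; infer_instance

-- ===== CLAIM (what is proved, stated in full; the proofs are below) =====
def Claim_equal_detect_sequence : Prop := ∀ (password : String), Dom_detect_sequence password → Spec_detect_sequence password (detect_sequence password)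

-- ===== LEMMAS AND PROOFS =====

-- the list of 4-grams B's set is built from (proof abbreviation; same expression as in the port)
def pvGrams : List String :=
  pvSequences.flatMap (fun seq =>
    (PySem.List.pyRange 0 (PySem.Str.len seq - 3) 1).map (fun i =>
      PySem.Str.slice seq (some i) (some (i + 4))))

theorem pvGrams_len : ∀ g ∈ pvGrams, g.toList.length = 4 := by decide

-- A = true ↔ some gram is an infix of the lowered password
theorem detectA_iff (password : String) :
    detect_sequence password = true ↔
      ∃ g ∈ pvGrams, g.toList <:+: (PySem.Str.lower password).toList := by
  unfold detect_sequence pvGrams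
  simp only [List.any_eq_true, List.mem_flatMap, List.mem_map, PySem.Str.isIn_iff_infix]
  constructor
  · rintro ⟨seq, hs, i, hi, h⟩
    exact ⟨_, ⟨seq, hs, i, hi, rfl⟩, h⟩
  · rintro ⟨g, ⟨seq, hs, i, hi, rfl⟩, h⟩
    exact ⟨seq, hs, i, hi, h⟩

-- a window slice of the lowered password, at a natural index, is drop/take on the char list
theorem window_toList (p : String) (j : Nat) :
    (PySem.Str.slice p (some (j : Int)) (some ((j : Int) + 4))).toList
      = (p.toList.drop j).take 4 := by
  have h4 : ((j : Int) + 4) = ((j : Int) + ((4 : Nat) : Int)) := by norm_cast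
  rw [PySem.Str.toList_slice, PySem.Chars.slice_eq_listSlice, h4, PySem.List.slice_natCast_add]

-- B = true ↔ some window of the lowered password is a gram
theorem detectB_iff (password : String) :
    detect_sequence_alt password = true ↔
      ∃ i : Int, i ∈ PySem.List.pyRange 0 (PySem.Str.len (PySem.Str.lower password) - 3) 1 ∧
        PySem.Str.slice (PySem.Str.lower password) (some i) (some (i + 4)) ∈ pvGrams := by
  unfold detect_sequence_alt
  rw [List.any_eq_true]
  constructor
  · rintro ⟨i, hi, h⟩
    refine ⟨i, hi, ?_⟩
    rw [← PySem.Set.mem_ofList (xs := pvGrams)]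
    simpa [PySem.Set.contains, pvGrams] using h
  · rintro ⟨i, hi, h⟩
    refine ⟨i, hi, ?_⟩
    rw [← PySem.Set.mem_ofList (xs := pvGrams)] at h
    simpa [PySem.Set.contains, pvGrams] using h

-- the central equivalence: a 4-gram occurs as infix iff some window equals a gram
theorem infix_iff_window (password : String) :
    (∃ g ∈ pvGrams, g.toList <:+: (PySem.Str.lower password).toList) ↔
      (∃ i : Int, i ∈ PySem.List.pyRange 0 (PySem.Str.len (PySem.Str.lower password) - 3) 1 ∧
        PySem.Str.slice (PySem.Str.lower password) (some i) (some (i + 4)) ∈ pvGrams) := by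
  constructor
  · rintro ⟨g, hg, hinf⟩
    obtain ⟨s, t, hst⟩ := hinf
    have hlen4 : g.toList.length = 4 := pvGrams_len g hg
    have hjlen : s.length + 4 ≤ (PySem.Str.lower password).toList.length := by
      rw [← hst]; simp only [List.length_append, hlen4]; omega
    refine ⟨(s.length : Int), ?_, ?_⟩
    · rw [PySem.List.mem_pyRange_one]
      constructor
      · exact_mod_cast Nat.zero_le _
      · simp only [PySem.Str.len_eq]
        omega
    · have hw := window_toList (PySem.Str.lower password) s.length
      have hdrop : (PySem.Str.lower password).toList.drop s.length = g.toList ++ t := by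
        rw [← hst, List.append_assoc, List.drop_left]
      have htake : ((PySem.Str.lower password).toList.drop s.length).take 4 = g.toList := by
        rw [hdrop, ← hlen4, List.take_left]
      have hgl : (PySem.Str.slice (PySem.Str.lower password) (some (s.length : Int))
          (some ((s.length : Int) + 4))).toList = g.toList := by
        rw [hw, htake]
      rwa [String.toList_inj.mp hgl]
  · rintro ⟨i, hi, hmem⟩
    rw [PySem.List.mem_pyRange_one] at hi
    obtain ⟨h0, _⟩ := hi
    obtain ⟨j, rfl⟩ : ∃ j : Nat, i = (j : Int) := ⟨i.toNat, (Int.toNat_of_nonneg h0).symm⟩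
    refine ⟨_, hmem, ?_⟩
    rw [window_toList (PySem.Str.lower password) j]
    exact ((List.take_prefix 4 ((PySem.Str.lower password).toList.drop j)).isInfix).trans
      ((PySem.Str.lower password).toList.drop_suffix j).isInfix

-- ===== VERDICT (by name: the statement is the Claim_ definition above) =====
theorem detect_sequence_spec : Claim_equal_detect_sequence := by
  intro password _
  unfold Spec_detect_sequence
  rcases hB : detect_sequence_alt password with _ | _
  · rcases hA : detect_sequence password with _ | _
    · rfl
    · exfalso
      have := (detectB_iff password).mpr
        ((infix_iff_window password).mp ((detectA_iff password).mp hA))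
      rw [hB] at this; exact Bool.false_ne_true this
  · exact (detectA_iff password).mpr
      ((infix_iff_window password).mpr ((detectB_iff password).mp hB))
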